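-- pv_equiv track=rewrite | github.com/meyersbs/developer-apologies | scripts/count_apologies.py | _countApologies
-- ===== SOURCE A (Python) =====
-- APOLOGY_LEMMAS = [
--     "apology", "apologise", "apologize", "blame", "excuse", "fault", "forgive", "mistake",
--     "mistaken", "oops", "pardon", "regret", "sorry"
-- ]
--
-- def _countApologies(lemmas):
--     """
--     Count the number of apology lemmas in a comment.
--
--     GIVEN:
--       lemmas (str) -- lemmatized comment
--
--     RETURN:
--       num_apology_lemmas (int) -- number of apology lemmas in lemmas
--     """
--     num_apology_lemmas = 0
--     lems = lemmas.split(" ")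
--     for lem in lems:
--         for apology in APOLOGY_LEMMAS:
--             if apology == lem:
--                 num_apology_lemmas += 1
--
--     return num_apology_lemmas
-- ===== SOURCE B (Python) =====
-- APOLOGY_LEMMAS = [
--     "apology", "apologise", "apologize", "blame", "excuse", "fault", "forgive", "mistake",
--     "mistaken", "oops", "pardon", "regret", "sorry"
-- ]
--
-- APOLOGY_SET = frozenset(APOLOGY_LEMMAS)
--
-- def _countApologies(lemmas):
--     # Streaming scan: walk the characters once, assembling the current word;
--     # each space (and the end of the string) closes a word, which is tested
--     # against a hash set of the apology lemmas. No split(), no word list.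
--     num_apology_lemmas = 0
--     word = ""
--     for ch in lemmas:
--         if ch == " ":
--             if word in APOLOGY_SET:
--                 num_apology_lemmas += 1
--             word = ""
--         else:
--             word += ch
--     if word in APOLOGY_SET:
--         num_apology_lemmas += 1
--     return num_apology_lemmas
-- ===== Notes on version B (the rewrite author's own statement) =====
-- stated objective: alternative
-- what changed: Replaces split-into-a-word-list plus a nested scan of the 13 lemmas per word by a single streaming pass over the characters: the current word is assembled char by char and, each time a space (or the end of the string) closes it, tested against a frozenset of the lemmas.
import Mathlib
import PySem

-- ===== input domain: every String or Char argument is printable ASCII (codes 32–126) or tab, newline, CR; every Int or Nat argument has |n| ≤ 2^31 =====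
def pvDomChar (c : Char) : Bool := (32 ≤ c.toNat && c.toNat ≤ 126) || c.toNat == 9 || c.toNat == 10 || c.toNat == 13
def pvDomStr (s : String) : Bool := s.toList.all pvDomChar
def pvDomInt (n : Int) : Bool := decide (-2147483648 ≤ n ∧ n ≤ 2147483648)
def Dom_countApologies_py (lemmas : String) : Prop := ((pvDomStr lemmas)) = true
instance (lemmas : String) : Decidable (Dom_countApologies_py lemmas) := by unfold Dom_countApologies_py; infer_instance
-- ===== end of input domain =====

-- B replaces split-then-nested-scan by a single streaming pass over the characters,
-- closing each word at a space and testing it against a set (objective: alternative).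

def apologyLemmas : List String :=
  ["apology", "apologise", "apologize", "blame", "excuse", "fault", "forgive", "mistake",
   "mistaken", "oops", "pardon", "regret", "sorry"]

-- ===== PORT A =====
def countApologies_py (lemmas : String) : Int :=
  let lems := ((PySem.Str.split? lemmas " ").getD [])  -- sep nonempty: split? is always some
  lems.foldl (fun acc lem =>
    apologyLemmas.foldl (fun acc2 apology => if apology == lem then acc2 + 1 else acc2) acc) 0

-- ===== PORT B =====
-- frozenset(APOLOGY_LEMMAS), as a set of char lists (words are assembled as char lists)
def apologySet : PySem.Set (List Char) := PySem.Set.ofList (apologyLemmas.map String.toList)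

def countApologies_py_alt (lemmas : String) : Int :=
  let r := lemmas.toList.foldl
    (fun (st : Int × List Char) ch =>
      if ch == ' ' then
        (if PySem.Set.contains apologySet st.2 then st.1 + 1 else st.1, [])
      else
        (st.1, st.2 ++ [ch]))
    (0, [])
  if PySem.Set.contains apologySet r.2 then r.1 + 1 else r.1

-- ===== PRECONDITION & SPEC =====
def Spec_countApologies_py (lemmas : String) (out : Int) : Prop := out = countApologies_py_alt lemmas
instance (lemmas : String) (out : Int) : Decidable (Spec_countApologies_py lemmas out) := by unfold Spec_countApologies_py; infer_instance

-- ===== CLAIM (what is proved, stated in full; the proofs are below) =====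
def Claim_equal_countApologies_py : Prop := ∀ (lemmas : String), Dom_countApologies_py lemmas → Spec_countApologies_py lemmas (countApologies_py lemmas)

-- ===== LEMMAS AND PROOFS =====

-- natural recursion computing s.split(" ") on char lists (proof-side reference)
def splitSp : List Char → List (List Char)
  | [] => [[]]
  | c :: cs =>
      let r := splitSp cs
      if c = ' ' then [] :: r else (c :: r.headI) :: r.tail

lemma splitSp_ne_nil (cs : List Char) : splitSp cs ≠ [] := by
  cases cs with
  | nil => simp [splitSp]
  | cons c cs => simp only [splitSp]; split_ifs <;> simp

lemma splitSp_headI_tail (cs : List Char) :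
    (splitSp cs).headI :: (splitSp cs).tail = splitSp cs := by
  cases h : splitSp cs with
  | nil => exact absurd h (splitSp_ne_nil cs)
  | cons a t => simp

lemma splitOn_go_eq (l : List Char) : ∀ (fuel : Nat) (cur : List Char) (acc : List (List Char)),
    l.length < fuel →
    PySem.Chars.splitOn.go [' '] fuel l cur acc
      = acc.reverse ++ ((cur.reverse ++ (splitSp l).headI) :: (splitSp l).tail) := by
  induction l with
  | nil =>
      intro fuel cur acc h
      match fuel with
      | fuel + 1 => simp [PySem.Chars.splitOn.go, splitSp]
  | cons c rest ih =>
      intro fuel cur acc h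
      match fuel with
      | fuel + 1 =>
        by_cases hc : c = ' '
        · subst hc
          simp only [PySem.Chars.splitOn.go, List.isPrefixOf, BEq.rfl, Bool.true_and,
            if_true, List.length_cons, List.drop_succ_cons, List.length_nil, List.drop_zero]
          rw [ih fuel [] (cur.reverse :: acc) (by simpa using Nat.lt_of_succ_lt_succ h)]
          simp [splitSp]
          exact splitSp_headI_tail rest
        · have hpf : ([' '].isPrefixOf (c :: rest)) = false := by
            simp [List.isPrefixOf]; exact fun hh => hc hh.symm
          simp only [PySem.Chars.splitOn.go, hpf, Bool.false_eq_true, if_false]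
          rw [ih fuel (c :: cur) acc (by simpa using Nat.lt_of_succ_lt_succ h)]
          simp [splitSp, hc]

lemma splitOn_eq_splitSp (s : List Char) : PySem.Chars.splitOn s [' '] = splitSp s := by
  unfold PySem.Chars.splitOn
  rw [splitOn_go_eq s (s.length + 1) [] [] (Nat.lt_succ_self _)]
  simpa using splitSp_headI_tail s

lemma mem_ofList_iff (cs : List Char) :
    (String.ofList cs ∈ apologyLemmas) ↔ cs ∈ apologyLemmas.map String.toList := by
  constructor
  · intro h
    exact List.mem_map.2 ⟨String.ofList cs, h, String.toList_ofList⟩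
  · rintro h
    rcases List.mem_map.1 h with ⟨a, ha, rfl⟩
    simpa [String.ofList_toList] using ha

lemma apologySet_eq : apologySet = apologyLemmas.map String.toList := by decide

-- the per-word count of A equals the 0/1 set test of B
lemma count_elem (cs : List Char) :
    ((List.count (String.ofList cs) apologyLemmas : Nat) : Int)
      = if PySem.Set.contains apologySet cs then 1 else 0 := by
  have hcont : PySem.Set.contains apologySet cs
      = decide (cs ∈ apologyLemmas.map String.toList) := by
    rw [apologySet_eq]; simp [PySem.Set.contains]
  rw [hcont]
  by_cases hm : cs ∈ apologyLemmas.map String.toList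
  · have hmem : String.ofList cs ∈ apologyLemmas := (mem_ofList_iff cs).2 hm
    have hnd : apologyLemmas.Nodup := by decide
    simp [hm, List.count_eq_one_of_mem hnd hmem]
  · have hmem : String.ofList cs ∉ apologyLemmas := fun h => hm ((mem_ofList_iff cs).1 h)
    simp [hm, List.count_eq_zero_of_not_mem hmem]

-- summing A's per-word counts is counting the words that pass B's set test
lemma sumcount (ws : List (List Char)) :
    (ws.map (fun cs => (List.count (String.ofList cs) apologyLemmas : Int))).sum
      = (ws.countP (fun cs => PySem.Set.contains apologySet cs) : Int) := by
  induction ws with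
  | nil => simp
  | cons c t ih =>
      rw [List.map_cons, List.sum_cons, List.countP_cons, ih, count_elem]
      split_ifs <;> push_cast <;> ring

-- the streaming fold of B counts the words of splitSp that lie in the set
lemma stream_eq (p : List Char → Bool) :
    ∀ (cs : List Char) (n : Int) (w : List Char),
    (if p (cs.foldl
        (fun (st : Int × List Char) ch =>
          if ch == ' ' then (if p st.2 then st.1 + 1 else st.1, [])
          else (st.1, st.2 ++ [ch])) (n, w)).2
      then (cs.foldl
        (fun (st : Int × List Char) ch =>
          if ch == ' ' then (if p st.2 then st.1 + 1 else st.1, [])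
          else (st.1, st.2 ++ [ch])) (n, w)).1 + 1
      else (cs.foldl
        (fun (st : Int × List Char) ch =>
          if ch == ' ' then (if p st.2 then st.1 + 1 else st.1, [])
          else (st.1, st.2 ++ [ch])) (n, w)).1)
      = n + (((w ++ (splitSp cs).headI) :: (splitSp cs).tail).countP p : Int) := by
  intro cs
  induction cs with
  | nil =>
      intro n w
      simp only [List.foldl_nil, splitSp, List.headI, List.tail, List.append_nil,
        List.countP_cons, List.countP_nil]
      split_ifs <;> simp
  | cons c rest ih =>
      intro n w
      simp only [List.foldl_cons]
      by_cases hc : c = ' '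
      · subst hc
        simp only [BEq.rfl, if_true]
        rw [ih]
        have hsp : splitSp (' ' :: rest) = [] :: splitSp rest := by
          simp [splitSp]
        rw [hsp]
        simp only [List.headI_cons, List.tail_cons, List.nil_append, List.append_nil]
        rw [splitSp_headI_tail rest, List.countP_cons]
        split_ifs <;> push_cast <;> ring
      · have hcb : (c == ' ') = false := by simp [hc]
        simp only [hcb, Bool.false_eq_true, if_false]
        rw [ih]
        have hsp : splitSp (c :: rest)
            = (c :: (splitSp rest).headI) :: (splitSp rest).tail := by
          simp [splitSp, hc]
        rw [hsp]
        simp [List.append_assoc]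

theorem countApologies_py_spec : Claim_equal_countApologies_py := by
  intro lemmas _
  unfold Spec_countApologies_py countApologies_py countApologies_py_alt
  have hsplit : ((PySem.Str.split? lemmas " ").getD [])
      = (splitSp lemmas.toList).map String.ofList := by
    simp [PySem.Str.split?, PySem.Chars.split?, splitOn_eq_splitSp]
  simp only [hsplit]
  -- A side: inner loop = count, outer loop = sum of counts, sum = countP of the set test
  have hA := PySem.List.foldl_congr_mem ((splitSp lemmas.toList).map String.ofList)
      (fun acc lem => apologyLemmas.foldl
        (fun acc2 apology => if apology == lem then acc2 + 1 else acc2) acc)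
      (fun acc lem => acc + (List.count lem apologyLemmas : Int)) 0
      (fun acc x _ => PySem.List.foldl_beq_add_one apologyLemmas x acc)
  rw [hA, PySem.List.foldl_add]
  rw [List.map_map]
  simp only [Function.comp_def]
  rw [sumcount]
  -- B side: the streaming fold counts the same words
  rw [stream_eq (fun cs => PySem.Set.contains apologySet cs) lemmas.toList 0 []]
  rw [List.nil_append, splitSp_headI_tail]
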